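-- pv_equiv track=rewrite | github.com/continuouspi/cpiwb | cpi_python/CPiSimulate/parseodes.py | parse_processdef
-- ===== SOURCE A (Python) =====
-- def parse_processdef(cpi_defs, species_list, process):
--     tokens = cpi_defs.split('\n')
--     pro_defination = []
--
--     for token_num in range(0, len(tokens)):
--         token = tokens[token_num]
--         if token[0:7] == 'species':
--             loc_name = token.find('(')
--             if token[8:loc_name] in species_list:
--                 pro_defination.append(token)
--                 if token.find(';') == -1:
--                     for num in range(token_num+1, len(tokens)):
--                         if tokens[num].find(';') != -1:
--                             pro_defination.append(tokens[num] + '\n')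
--                             break
--                         else:
--                             pro_defination.append(tokens[num])
--
--         elif token[0:7] == 'process':
--             loc_name = token.find('=')
--             if token[8:loc_name-1] == process:
--                 pro_defination.append(token)
--                 if token.find(';') == -1:
--                     for num in range(token_num+1, len(tokens)):
--                         if tokens[num].find(';') != -1:
--                             pro_defination.append(tokens[num] + '\n')
--                             break
--                         else:
--                             pro_defination.append(tokens[num])
--
--     return pro_defination
-- ===== SOURCE B (Python) =====
-- def parse_processdef(cpi_defs, species_list, process):
--     tokens = cpi_defs.split('\n')
--     n = len(tokens)
--     # backward pass: next_semi[k] = smallest index >= k whose line contains ';', else None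
--     next_semi = [None] * (n + 1)
--     for k in range(n - 1, -1, -1):
--         next_semi[k] = k if ';' in tokens[k] else next_semi[k + 1]
--     out = []
--     for i, token in enumerate(tokens):
--         if token[0:7] == 'species':
--             hit = token[8:token.find('(')] in species_list
--         elif token[0:7] == 'process':
--             hit = token[8:token.find('=') - 1] == process
--         else:
--             hit = False
--         if hit:
--             out.append(token)
--             if ';' not in token:
--                 j = next_semi[i + 1]
--                 if j is None:
--                     out.extend(tokens[i + 1:])
--                 else:
--                     out.extend(tokens[i + 1:j])
--                     out.append(tokens[j] + '\n')
--     return out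
-- ===== Notes on version B (the rewrite author's own statement) =====
-- stated objective: alternative
-- what changed: A rescans the lines after every matched header to find the terminating ';' line (nested loops); B makes one backward pass building a next-semicolon suffix table and then emits each matched block by a table lookup and a slice.
import Mathlib
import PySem

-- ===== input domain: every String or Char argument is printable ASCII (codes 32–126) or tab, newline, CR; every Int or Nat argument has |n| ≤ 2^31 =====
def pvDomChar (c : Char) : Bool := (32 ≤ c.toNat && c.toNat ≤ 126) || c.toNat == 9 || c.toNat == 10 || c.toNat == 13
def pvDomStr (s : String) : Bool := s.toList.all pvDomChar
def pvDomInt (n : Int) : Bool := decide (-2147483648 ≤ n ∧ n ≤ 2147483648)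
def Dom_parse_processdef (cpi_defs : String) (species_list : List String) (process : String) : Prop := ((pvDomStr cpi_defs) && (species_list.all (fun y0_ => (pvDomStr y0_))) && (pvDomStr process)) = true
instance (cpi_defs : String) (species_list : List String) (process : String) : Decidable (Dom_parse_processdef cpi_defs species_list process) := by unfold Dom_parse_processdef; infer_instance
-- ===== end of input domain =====

-- B replaces A's nested rescan for the terminating ';' line by one backward pass
-- building a next-semicolon suffix table, then emits each matched block by slicing
-- (objective: alternative decomposition; same observable output).

-- ===== PORT A =====
-- inner loop: for num in range(token_num+1, len(tokens)): append until a line containing ';' (appended with '\n'), else all of the rest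
def pvTailA (tokens : List String) (num : Nat) : List String :=
  if h : num < tokens.length then
    if PySem.Str.find tokens[num] ";" ≠ -1 then
      [tokens[num] ++ "\n"]
    else
      tokens[num] :: pvTailA tokens (num + 1)
  else []
termination_by tokens.length - num

-- outer loop over token_num in range(0, len(tokens))
def pvLoopA (tokens : List String) (species_list : List String) (process : String)
    (token_num : Nat) : List String :=
  if h : token_num < tokens.length then
    (if PySem.Str.slice tokens[token_num] (some 0) (some 7) = "species" then
        (if species_list.contains (PySem.Str.slice tokens[token_num] (some 8) (some (PySem.Str.find tokens[token_num] "("))) then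
          tokens[token_num] :: (if PySem.Str.find tokens[token_num] ";" = -1 then pvTailA tokens (token_num + 1) else [])
        else [])
      else if PySem.Str.slice tokens[token_num] (some 0) (some 7) = "process" then
        (if PySem.Str.slice tokens[token_num] (some 8) (some (PySem.Str.find tokens[token_num] "=" - 1)) = process then
          tokens[token_num] :: (if PySem.Str.find tokens[token_num] ";" = -1 then pvTailA tokens (token_num + 1) else [])
        else [])
      else [])
    ++ pvLoopA tokens species_list process (token_num + 1)
  else []
termination_by tokens.length - token_num

def parse_processdef (cpi_defs : String) (species_list : List String) (process : String) : List String :=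
  pvLoopA ((PySem.Str.split? cpi_defs "\n").getD []) species_list process 0

-- ===== PORT B =====
-- backward pass: pvNextSemi tokens k0 = [next_semi[k0], …, next_semi[k0+n]] (absolute indices), n = tokens.length
def pvNextSemi (tokens : List String) (k0 : Nat) : List (Option Nat) :=
  match tokens with
  | [] => [none]
  | t :: rest =>
    let tail := pvNextSemi rest (k0 + 1)
    (if PySem.Str.isIn ";" t then some k0 else tail.headD none) :: tail

-- the matched-header test of Source B
def pvHitB (token : String) (species_list : List String) (process : String) : Bool :=
  if PySem.Str.slice token (some 0) (some 7) = "species" then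
    species_list.contains (PySem.Str.slice token (some 8) (some (PySem.Str.find token "(")))
  else if PySem.Str.slice token (some 0) (some 7) = "process" then
    PySem.Str.slice token (some 8) (some (PySem.Str.find token "=" - 1)) == process
  else false

-- forward pass over enumerate(tokens); block emission by table lookup and slicing
def pvLoopB (tokens : List String) (ns : List (Option Nat)) (species_list : List String)
    (process : String) (i : Nat) (rem : List String) : List String :=
  match rem with
  | [] => []
  | token :: rest =>
    (if pvHitB token species_list process then
        token ::
          (if PySem.Str.isIn ";" token then []
           else
            match ns.getD (i + 1) none with
            | none => PySem.List.slice tokens (some ((i : Int) + 1)) none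
            | some j => PySem.List.slice tokens (some ((i : Int) + 1)) (some (j : Int))
                          ++ [tokens.getD j "" ++ "\n"])
      else [])
    ++ pvLoopB tokens ns species_list process (i + 1) rest

def parse_processdef_alt (cpi_defs : String) (species_list : List String) (process : String) : List String :=
  let tokens := (PySem.Str.split? cpi_defs "\n").getD []
  pvLoopB tokens (pvNextSemi tokens 0) species_list process 0 tokens

-- ===== PRECONDITION & SPEC =====
def Spec_parse_processdef (cpi_defs : String) (species_list : List String) (process : String) (out : List String) : Prop := out = parse_processdef_alt cpi_defs species_list process
instance (cpi_defs : String) (species_list : List String) (process : String) (out : List String) : Decidable (Spec_parse_processdef cpi_defs species_list process out) := by unfold Spec_parse_processdef; infer_instance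

-- ===== CLAIM (what is proved, stated in full; the proofs are below) =====
def Claim_equal_parse_processdef : Prop := ∀ (cpi_defs : String) (species_list : List String) (process : String), Dom_parse_processdef cpi_defs species_list process → Spec_parse_processdef cpi_defs species_list process (parse_processdef cpi_defs species_list process)

-- ===== LEMMAS AND PROOFS =====

-- downward-recursive characterisation of the next-';' index
def pvNxt (tokens : List String) (k : Nat) : Option Nat :=
  if h : k < tokens.length then
    if PySem.Str.isIn ";" tokens[k] then some k else pvNxt tokens (k + 1)
  else none
termination_by tokens.length - k

theorem pvNxt_cons_succ (t : String) (ts : List String) (d : Nat) :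
    pvNxt (t :: ts) (d + 1) = (pvNxt ts d).map (· + 1) := by
  induction hn : ts.length - d using Nat.strong_induction_on generalizing d with
  | _ n ih =>
    conv_lhs => rw [pvNxt]
    conv_rhs => rw [pvNxt]
    by_cases h : d < ts.length
    · rw [dif_pos (by simpa using Nat.succ_lt_succ h), dif_pos h]
      have hg : (t :: ts)[d + 1]'(by simpa using Nat.succ_lt_succ h) = ts[d] := by simp
      rw [hg]
      split_ifs with hsemi
      · simp
      · exact ih (ts.length - (d + 1)) (by omega) (d + 1) rfl
    · rw [dif_neg (show ¬ d + 1 < (t :: ts).length by simp only [List.length_cons]; omega),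
        dif_neg h]
      simp

theorem pvNextSemi_getD (ts : List String) (k0 d : Nat) :
    (pvNextSemi ts k0).getD d none = (pvNxt ts d).map (· + k0) := by
  induction ts generalizing k0 d with
  | nil =>
    rw [pvNxt]
    cases d <;> simp [pvNextSemi]
  | cons t rest ih =>
    cases d with
    | zero =>
      conv_rhs => rw [pvNxt]
      simp only [pvNextSemi, List.getD_cons_zero]
      rw [dif_pos (by simp : 0 < (t :: rest).length)]
      have hg : (t :: rest)[0]'(by simp) = t := rfl
      rw [hg]
      split_ifs with hsemi
      · simp
      · have hhead : (pvNextSemi rest (k0 + 1)).headD none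
            = (pvNextSemi rest (k0 + 1)).getD 0 none := by
          cases pvNextSemi rest (k0 + 1) <;> simp
        rw [hhead, ih (k0 + 1) 0, pvNxt_cons_succ t rest 0]
        cases pvNxt rest 0 with
        | none => simp
        | some a => simp; omega
    | succ d' =>
      simp only [pvNextSemi, List.getD_cons_succ]
      rw [ih (k0 + 1) d', pvNxt_cons_succ t rest d']
      cases pvNxt rest d' with
      | none => simp
      | some a => simp; omega

theorem pvNxt_some_bounds {tokens : List String} {k j : Nat}
    (h : pvNxt tokens k = some j) : k ≤ j ∧ j < tokens.length := by
  induction hn : tokens.length - k using Nat.strong_induction_on generalizing k with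
  | _ n ih =>
    rw [pvNxt] at h
    by_cases hk : k < tokens.length
    · rw [dif_pos hk] at h
      split_ifs at h with hsemi
      · cases h; exact ⟨le_refl _, hk⟩
      · have := ih (tokens.length - (k + 1)) (by omega) (k := k + 1) h rfl
        omega
    · rw [dif_neg hk] at h; cases h

theorem pvTailA_eq (tokens : List String) (k : Nat) :
    pvTailA tokens k =
      match pvNxt tokens k with
      | none => tokens.drop k
      | some j => PySem.List.slice tokens (some (k : Int)) (some (j : Int))
                    ++ [tokens.getD j "" ++ "\n"] := by
  induction hn : tokens.length - k using Nat.strong_induction_on generalizing k with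
  | _ n ih =>
    conv_lhs => rw [pvTailA]
    conv_rhs => rw [pvNxt]
    by_cases hk : k < tokens.length
    · rw [dif_pos hk, dif_pos hk]
      have hfi : (PySem.Str.find tokens[k] ";" ≠ -1) ↔ PySem.Str.isIn ";" tokens[k] = true := by
        rw [PySem.Str.find_ne_neg_one_iff, PySem.Str.isIn_iff_infix]
      by_cases hsemi : PySem.Str.isIn ";" tokens[k] = true
      · rw [if_pos (hfi.mpr hsemi), if_pos hsemi]
        simp [PySem.List.slice_natCast, List.getD_eq_getElem?_getD, hk]
      · rw [if_neg (fun hc => hsemi (hfi.mp hc)), if_neg hsemi]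
        rw [ih (tokens.length - (k + 1)) (by omega) (k + 1) rfl]
        rcases hj : pvNxt tokens (k + 1) with _ | j
        · simp only
          exact (List.drop_eq_getElem_cons hk).symm
        · simp only
          have hb := pvNxt_some_bounds hj
          rw [PySem.List.slice_natCast, PySem.List.slice_natCast,
            List.drop_eq_getElem_cons hk]
          have harith : j - k = (j - (k + 1)) + 1 := by omega
          rw [harith, List.take_succ_cons]
          simp
    · rw [dif_neg hk, dif_neg hk]
      exact (List.drop_eq_nil_of_le (by omega)).symm

theorem pvLoop_eq (tokens species_list : List String) (process : String) (i : Nat) :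
    pvLoopA tokens species_list process i
      = pvLoopB tokens (pvNextSemi tokens 0) species_list process i (tokens.drop i) := by
  induction hn : tokens.length - i using Nat.strong_induction_on generalizing i with
  | _ n ih =>
    conv_lhs => rw [pvLoopA]
    by_cases hk : i < tokens.length
    · rw [dif_pos hk]
      rw [List.drop_eq_getElem_cons hk]
      rw [pvLoopB]
      have hrec := ih (tokens.length - (i + 1)) (by omega) (i + 1) rfl
      rw [← hrec]
      refine congrArg₂ (· ++ ·) ?_ rfl
      -- per-token block
      have hns : (pvNextSemi tokens 0).getD (i + 1) none = pvNxt tokens (i + 1) := by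
        rw [pvNextSemi_getD]
        cases pvNxt tokens (i + 1) <;> simp
      have htail :
          (if PySem.Str.find tokens[i] ";" = -1 then pvTailA tokens (i + 1) else [])
            = (if PySem.Str.isIn ";" tokens[i] then ([] : List String)
               else
                match (pvNextSemi tokens 0).getD (i + 1) none with
                | none => PySem.List.slice tokens (some ((i : Int) + 1)) none
                | some j => PySem.List.slice tokens (some ((i : Int) + 1)) (some (j : Int))
                              ++ [tokens.getD j "" ++ "\n"]) := by
        have hcast : ((i : Int) + 1) = (((i + 1 : Nat)) : Int) := by push_cast; ring
        have hfi : (PySem.Str.find tokens[i] ";" = -1) ↔ ¬ PySem.Str.isIn ";" tokens[i] = true := by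
          rw [PySem.Str.find_eq_neg_one_iff, PySem.Str.isIn_iff_infix]
        by_cases hsemi : PySem.Str.isIn ";" tokens[i] = true
        · rw [if_neg (fun hc => (hfi.mp hc) hsemi), if_pos hsemi]
        · rw [if_pos (hfi.mpr hsemi), if_neg hsemi, hns, pvTailA_eq tokens (i + 1), hcast]
          rcases pvNxt tokens (i + 1) with _ | j
          · simp only
            rw [PySem.List.slice_from_natCast]
          · rfl
      rw [htail]
      unfold pvHitB
      by_cases h1 : PySem.Str.slice tokens[i] (some 0) (some 7) = "species"
      · rw [if_pos h1, if_pos h1]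
      · rw [if_neg h1, if_neg h1]
        by_cases h3 : PySem.Str.slice tokens[i] (some 0) (some 7) = "process"
        · rw [if_pos h3, if_pos h3]
          by_cases h4 : PySem.Str.slice tokens[i] (some 8)
              (some (PySem.Str.find tokens[i] "=" - 1)) = process
          · rw [if_pos h4]; simp; simpa using h4
          · rw [if_neg h4]; simp; simpa using h4
        · rw [if_neg h3, if_neg h3]
          simp
    · rw [dif_neg hk, List.drop_eq_nil_of_le (by omega), pvLoopB]

-- ===== VERDICT (by name: the statement is the Claim_ definition above) =====
theorem parse_processdef_spec : Claim_equal_parse_processdef := by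
  intro cpi_defs species_list process _
  unfold Spec_parse_processdef parse_processdef parse_processdef_alt
  simpa using pvLoop_eq ((PySem.Str.split? cpi_defs "\n").getD []) species_list process 0
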